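-- pv_equiv track=rewrite | github.com/dmnlegendary/Programas_Lenguaje_Horacio | Programas3_Traductor_con_Frases/UltimoTraductor/parte6.py | aplicar_reglas
-- ===== SOURCE A (Python) =====
-- def aplicar_reglas(etiquetas, palabras, reglas):
--     secuencia_etiquetas = " ".join(etiquetas)
--     if secuencia_etiquetas in reglas:
--         nuevo_orden = reglas[secuencia_etiquetas]
--         palabras_reordenadas = []
--         for etiqueta in nuevo_orden:
--             for i, etiqueta_actual in enumerate(etiquetas):
--                 if etiqueta_actual == etiqueta and palabras[i] not in palabras_reordenadas:
--                     palabras_reordenadas.append(palabras[i])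
--                     break
--         return palabras_reordenadas
--     return palabras
-- ===== SOURCE B (Python) =====
-- def aplicar_reglas(etiquetas, palabras, reglas):
--     clave = " ".join(etiquetas)
--     if clave not in reglas:
--         return palabras
--     # stage 1: per-tag queue of its words, duplicates within a tag dropped
--     colas = {}
--     for t, w in zip(etiquetas, palabras):
--         cola = colas.setdefault(t, [])
--         if w not in cola:
--             cola.append(w)
--     # stage 2: consume each tag's queue destructively; a word once emitted
--     # (tracked in a set) is skipped permanently, since the result only grows
--     resultado = []
--     usadas = set()
--     for t in reglas[clave]:
--         cola = colas.get(t, [])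
--         while cola and cola[0] in usadas:
--             cola.pop(0)
--         if cola:
--             w = cola.pop(0)
--             usadas.add(w)
--             resultado.append(w)
--     return resultado
-- ===== Notes on version B (the rewrite author's own statement) =====
-- stated objective: alternative
-- what changed: B is a two-stage algorithm: it first builds per-tag word queues (dropping duplicate words within a tag), then consumes each queue destructively per rule tag, permanently popping words already emitted (tracked in a set), so A's repeated rescans of the whole tag list disappear.
-- outside the precondition, e.g. on aplicar_reglas(['N', 'V'], ['a'], {'N V': ['N']}): A returns ['a'], B returns ['a']
import Mathlib
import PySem

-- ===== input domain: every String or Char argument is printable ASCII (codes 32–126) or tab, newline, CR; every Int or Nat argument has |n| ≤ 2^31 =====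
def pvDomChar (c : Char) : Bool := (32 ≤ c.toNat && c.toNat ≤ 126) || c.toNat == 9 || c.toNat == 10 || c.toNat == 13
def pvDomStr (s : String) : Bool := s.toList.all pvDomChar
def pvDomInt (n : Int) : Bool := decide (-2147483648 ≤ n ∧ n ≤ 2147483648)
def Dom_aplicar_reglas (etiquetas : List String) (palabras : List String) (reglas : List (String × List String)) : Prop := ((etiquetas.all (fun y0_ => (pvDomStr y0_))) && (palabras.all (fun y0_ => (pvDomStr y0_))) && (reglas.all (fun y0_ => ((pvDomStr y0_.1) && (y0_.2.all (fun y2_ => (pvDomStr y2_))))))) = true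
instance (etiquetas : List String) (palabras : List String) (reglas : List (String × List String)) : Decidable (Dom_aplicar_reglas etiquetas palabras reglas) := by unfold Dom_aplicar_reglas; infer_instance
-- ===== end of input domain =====

-- B replaces A's per-rule-tag rescans of the whole tag list by two stages: it first builds
-- per-tag queues of that tag's words (duplicates within a tag dropped), then consumes each
-- queue destructively, popping words already emitted; return values proved equal on Pre_.

-- ===== PORT A =====
-- inner 'for i, etiqueta_actual in enumerate(etiquetas): … break' (index carried explicitly)
def pvInnerA (palabras : List String) (etiqueta : String) (acc : List String) (i : Int) : List String → List String
  | [] => acc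
  | e :: rest =>
    if e == etiqueta && !(acc.contains (PySem.List.pyGetD palabras i "")) then
      acc ++ [PySem.List.pyGetD palabras i ""]
    else pvInnerA palabras etiqueta acc (i + 1) rest

def aplicar_reglas (etiquetas : List String) (palabras : List String) (reglas : List (String × List String)) : List String :=
  let secuencia_etiquetas := PySem.Str.join " " etiquetas
  match (PySem.Dict.mk reglas).get? secuencia_etiquetas with
  | some nuevo_orden =>
      nuevo_orden.foldl (fun acc etiqueta => pvInnerA palabras etiqueta acc 0 etiquetas) []
  | none => palabras

-- ===== PORT B =====
-- stage-1 step: 'cola = colas.setdefault(t, []); if w not in cola: cola.append(w)'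
def pvBuildStep (d : PySem.Dict String (List String)) (p : String × String) : PySem.Dict String (List String) :=
  let d1 := d.setdefault p.1 []
  let cola := d1.getD p.1 []
  if cola.contains p.2 then d1 else d1.insert p.1 (cola ++ [p.2])

-- stage-2 step: pop already-used words off the queue's front, then emit its head if any
def pvStepB (st : PySem.Dict String (List String) × PySem.Set String × List String) (t : String) :
    PySem.Dict String (List String) × PySem.Set String × List String :=
  match (st.1.getD t []).dropWhile (fun w => PySem.Set.contains st.2.1 w) with
  | [] => (st.1.insert t [], st.2.1, st.2.2)
  | w :: rest => (st.1.insert t rest, PySem.Set.add st.2.1 w, st.2.2 ++ [w])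

def aplicar_reglas_alt (etiquetas : List String) (palabras : List String) (reglas : List (String × List String)) : List String :=
  let clave := PySem.Str.join " " etiquetas
  match (PySem.Dict.mk reglas).get? clave with
  | none => palabras
  | some nuevo_orden =>
      let colas := (etiquetas.zip palabras).foldl pvBuildStep PySem.Dict.empty
      (nuevo_orden.foldl pvStepB (colas, PySem.Set.empty, [])).2.2

-- ===== PRECONDITION & SPEC =====
-- Pre_ excludes inputs where a matching rule could make A index palabras past its end
-- (IndexError): when the tag sequence has a rule, palabras must be at least as long as
-- etiquetas (a coarse bound: a few such inputs on which A happens to return are excluded too).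
def Pre_aplicar_reglas (etiquetas : List String) (palabras : List String) (reglas : List (String × List String)) : Prop :=
  (PySem.Dict.mk reglas).contains (PySem.Str.join " " etiquetas) = true → etiquetas.length ≤ palabras.length
instance (etiquetas : List String) (palabras : List String) (reglas : List (String × List String)) : Decidable (Pre_aplicar_reglas etiquetas palabras reglas) := by unfold Pre_aplicar_reglas; infer_instance

def pvWitness_aplicar_reglas : List String × List String × (List (String × List String)) :=
  (["D", "N"], ["el", "gato"], [("D N", ["N", "D"])])

def Spec_aplicar_reglas (etiquetas : List String) (palabras : List String) (reglas : List (String × List String)) (out : List String) : Prop := out = aplicar_reglas_alt etiquetas palabras reglas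
instance (etiquetas : List String) (palabras : List String) (reglas : List (String × List String)) (out : List String) : Decidable (Spec_aplicar_reglas etiquetas palabras reglas out) := by unfold Spec_aplicar_reglas; infer_instance

-- ===== CLAIM (what is proved, stated in full; the proofs are below) =====
def Claim_equal_aplicar_reglas : Prop := ∀ (etiquetas : List String) (palabras : List String) (reglas : List (String × List String)), Dom_aplicar_reglas etiquetas palabras reglas → Pre_aplicar_reglas etiquetas palabras reglas → Spec_aplicar_reglas etiquetas palabras reglas (aplicar_reglas etiquetas palabras reglas)

-- ===== LEMMAS AND PROOFS =====

-- the words carrying tag t, in order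
def pvWordsOf (t : String) (pairs : List (String × String)) : List String :=
  (pairs.filter (fun p => p.1 == t)).map Prod.snd

-- ordered dedup relative to a seen-list
def pvDedupF (seen : List String) : List String → List String
  | [] => []
  | w :: rest => if seen.contains w then pvDedupF seen rest else w :: pvDedupF (seen ++ [w]) rest

-- 'first word of l not yet in acc, appended to acc' — the value of A's inner loop
def pvFirst (acc l : List String) : List String :=
  match l.dropWhile (fun w => acc.contains w) with
  | [] => acc
  | w :: _ => acc ++ [w]

-- A's inner scan equals pvFirst over the tag's word list
theorem pvInnerA_eq (palabras : List String) (t : String) :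
    ∀ (ets : List String) (k : Nat) (acc : List String), k + ets.length ≤ palabras.length →
      pvInnerA palabras t acc (k : Int) ets = pvFirst acc (pvWordsOf t (ets.zip (palabras.drop k))) := by
  intro ets
  induction ets with
  | nil => intro k acc _; simp [pvInnerA, pvFirst, pvWordsOf]
  | cons e rest ih =>
    intro k acc h
    have hk : k < palabras.length := by simp at h; omega
    have hget : PySem.List.pyGetD palabras (k : Int) "" = palabras[k] := by
      simp [PySem.List.pyGetD_natCast, List.getD, List.getElem?_eq_getElem hk]
    have hdrop : palabras.drop k = palabras[k] :: palabras.drop (k + 1) :=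
      List.drop_eq_getElem_cons hk
    have hcast : (↑k + 1 : Int) = ((k + 1 : Nat) : Int) := by push_cast; ring
    rw [hdrop]
    simp only [pvInnerA, hget, List.zip_cons_cons]
    by_cases he : e == t
    · by_cases hm : palabras[k] ∈ acc
      · rw [if_neg (by simp [he, hm]), hcast, ih (k + 1) acc (by simp at h ⊢; omega)]
        simp [pvFirst, pvWordsOf, he, hm]
      · rw [if_pos (by simp [he, hm])]
        simp [pvFirst, pvWordsOf, he, hm]
    · rw [if_neg (by simp [he]), hcast, ih (k + 1) acc (by simp at h ⊢; omega)]
      simp [pvWordsOf, he]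

-- one build step, seen from a fixed key t
theorem pvBuildStep_getD (d : PySem.Dict String (List String)) (u w t : String) :
    (pvBuildStep d (u, w)).getD t [] =
      if t = u then (if (d.getD u []).contains w then d.getD u [] else d.getD u [] ++ [w])
      else d.getD t [] := by
  unfold pvBuildStep
  simp only [PySem.Dict.getD_setdefault_self]
  by_cases hc : (d.getD u []).contains w = true
  · rw [if_pos hc]
    by_cases ht : t = u
    · subst ht; rw [if_pos rfl, if_pos hc, PySem.Dict.getD_setdefault_self]
    · rw [if_neg ht]
      simp [PySem.Dict.getD, PySem.Dict.get?_setdefault_of_ne d ([] : List String) ht]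
  · rw [if_neg hc]
    by_cases ht : t = u
    · subst ht; rw [if_pos rfl, if_neg hc, PySem.Dict.getD_insert_self]
    · rw [if_neg ht, PySem.Dict.getD_insert_of_ne _ _ _ ht]
      simp [PySem.Dict.getD, PySem.Dict.get?_setdefault_of_ne d ([] : List String) ht]

-- membership in a set after add
theorem pvSet_contains_add (s : PySem.Set String) (w x : String) :
    PySem.Set.contains (PySem.Set.add s w) x = (PySem.Set.contains s x || x == w) := by
  by_cases hx : x = w
  · subst hx
    by_cases h : PySem.Set.contains s x = true
    · simp [PySem.Set.add, PySem.Set.contains] at h ⊢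
      simp [h]
    · simp [PySem.Set.add, PySem.Set.contains] at h ⊢
      simp [h]
  · by_cases h : PySem.Set.contains s w = true
    · simp [PySem.Set.add, PySem.Set.contains] at h ⊢
      simp [h, hx]
    · simp [PySem.Set.add, PySem.Set.contains] at h ⊢
      simp [h, hx]

-- stage 1 computes, at each key, the fold of its word list
theorem pvBuild_getD (t : String) :
    ∀ (pairs : List (String × String)) (d : PySem.Dict String (List String)),
      (pairs.foldl pvBuildStep d).getD t [] =
        (pvWordsOf t pairs).foldl (fun c w => if c.contains w then c else c ++ [w]) (d.getD t []) := by
  intro pairs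
  induction pairs with
  | nil => intro d; simp [pvWordsOf]
  | cons p rest ih =>
    intro d
    obtain ⟨u, w⟩ := p
    by_cases ht : t = u
    · subst ht
      simp only [List.foldl_cons, ih, pvBuildStep_getD]
      simp [pvWordsOf]
    · have hne : (u == t) = false := by simp; exact fun h => ht h.symm
      simp only [List.foldl_cons, ih, pvBuildStep_getD, if_neg ht]
      simp [pvWordsOf, hne]

-- the contains-fold is pvDedupF
theorem pvFold_eq_dedupF : ∀ (l c : List String),
    l.foldl (fun c w => if c.contains w then c else c ++ [w]) c = c ++ pvDedupF c l := by
  intro l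
  induction l with
  | nil => intro c; simp [pvDedupF]
  | cons w rest ih =>
    intro c
    rw [List.foldl_cons, ih]
    by_cases h : w ∈ c
    · simp [pvDedupF, h]
    · simp [pvDedupF, h]

-- dedup does not change the first element failing a predicate
theorem pvDedupF_dropWhile_head (p : String → Bool) :
    ∀ (l seen : List String),
      ((pvDedupF seen l).dropWhile p).head? =
        (l.dropWhile (fun w => p w || seen.contains w)).head? := by
  intro l
  induction l with
  | nil => intro seen; simp [pvDedupF]
  | cons w rest ih =>
    intro seen
    by_cases hs : w ∈ seen
    · simp [pvDedupF, hs, ih]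
    · by_cases hp : p w = true
      · have hpred : (fun w' => p w' || (seen ++ [w]).contains w') =
            (fun w' => p w' || seen.contains w') := by
          funext w'
          by_cases he : w' = w
          · subst he; simp [hp]
          · simp [he]
        rw [show pvDedupF seen (w :: rest) = w :: pvDedupF (seen ++ [w]) rest by
          simp [pvDedupF, hs]]
        rw [List.dropWhile_cons, if_pos hp, ih (seen ++ [w]), hpred]
        simp [hp, hs]
      · simp [pvDedupF, hs, hp]

-- dropping an all-true prefix
theorem pvDropWhile_append_of_all (p : String → Bool) :
    ∀ (l1 l2 : List String), (∀ x ∈ l1, p x = true) →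
      (l1 ++ l2).dropWhile p = l2.dropWhile p := by
  intro l1
  induction l1 with
  | nil => intro l2 _; simp
  | cons x rest ih =>
    intro l2 h
    simp only [List.cons_append, List.dropWhile_cons, h x (by simp)]
    exact ih l2 (fun y hy => h y (by simp [hy]))

-- the head A picks equals the head of the current queue, under the invariant
theorem pvPick_eq (W rem dropped res : List String)
    (hdec : pvDedupF [] W = dropped ++ rem)
    (hdm : ∀ w ∈ dropped, res.contains w = true) :
    W.dropWhile (fun w => res.contains w) = [] ∧ rem.dropWhile (fun w => res.contains w) = [] ∨
    ∃ w l1 l2, W.dropWhile (fun w => res.contains w) = w :: l1 ∧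
      rem.dropWhile (fun w => res.contains w) = w :: l2 := by
  have h1 : (W.dropWhile (fun w => res.contains w)).head? =
      (rem.dropWhile (fun w => res.contains w)).head? := by
    have := pvDedupF_dropWhile_head (fun w => res.contains w) W []
    simp only [List.contains_nil, Bool.or_false] at this
    rw [← this, hdec, pvDropWhile_append_of_all _ _ _ hdm]
  cases hW : W.dropWhile (fun w => res.contains w) with
  | nil =>
    cases hR : rem.dropWhile (fun w => res.contains w) with
    | nil => exact Or.inl ⟨rfl, rfl⟩
    | cons w l2 => rw [hW, hR] at h1; simp at h1
  | cons w l1 =>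
    cases hR : rem.dropWhile (fun w => res.contains w) with
    | nil => rw [hW, hR] at h1; simp at h1
    | cons w' l2 =>
      rw [hW, hR] at h1; simp at h1
      exact Or.inr ⟨w, l1, l2, rfl, by rw [h1]⟩

-- invariant of the consumption stage
theorem pvConsume (pairs : List (String × String)) :
    ∀ (order : List String) (colas : PySem.Dict String (List String))
      (usadas : PySem.Set String) (res : List String),
      (∀ w, PySem.Set.contains usadas w = res.contains w) →
      (∀ t, ∃ dropped, pvDedupF [] (pvWordsOf t pairs) = dropped ++ colas.getD t [] ∧
          ∀ w ∈ dropped, res.contains w = true) →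
      order.foldl (fun acc t => pvFirst acc (pvWordsOf t pairs)) res =
        (order.foldl pvStepB (colas, usadas, res)).2.2 := by
  intro order
  induction order with
  | nil => intro colas usadas res _ _; simp
  | cons u rest ih =>
    intro colas usadas res hus hinv
    obtain ⟨dropped, hdec, hdm⟩ := hinv u
    have hpred : (fun w => PySem.Set.contains usadas w) = (fun w => res.contains w) :=
      funext hus
    have hstep : pvStepB (colas, usadas, res) u =
        match (colas.getD u []).dropWhile (fun w => res.contains w) with
        | [] => (colas.insert u [], usadas, res)
        | w :: rest' => (colas.insert u rest', PySem.Set.add usadas w, res ++ [w]) := by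
      unfold pvStepB; rw [hpred]
    rcases pvPick_eq (pvWordsOf u pairs) (colas.getD u []) dropped res hdec hdm with
      ⟨hW, hR⟩ | ⟨w, l1, l2, hW, hR⟩
    · -- nothing picked
      simp only [List.foldl_cons, hstep, hR]
      rw [show pvFirst res (pvWordsOf u pairs) = res by unfold pvFirst; rw [hW]]
      apply ih
      · exact hus
      · intro t
        by_cases ht : t = u
        · subst ht
          refine ⟨dropped ++ colas.getD t [], by simp [hdec, PySem.Dict.getD_insert_self], ?_⟩
          intro w hw
          rcases List.mem_append.mp hw with h | h
          · exact hdm w h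
          · have := List.dropWhile_eq_nil_iff.mp hR
            exact this w h
        · obtain ⟨dr, h1, h2⟩ := hinv t
          exact ⟨dr, by rw [PySem.Dict.getD_insert_of_ne _ _ _ ht]; exact h1, h2⟩
    · -- w picked
      simp only [List.foldl_cons, hstep, hR]
      rw [show pvFirst res (pvWordsOf u pairs) = res ++ [w] by unfold pvFirst; rw [hW]]
      apply ih
      · intro x
        rw [pvSet_contains_add, hus x]
        by_cases hx : x = w
        · subst hx; simp
        · simp [hx]
      · intro t
        by_cases ht : t = u
        · subst ht
          have hsplit : colas.getD t [] =
              (colas.getD t []).takeWhile (fun w => res.contains w) ++ w :: l2 := by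
            conv_lhs => rw [← List.takeWhile_append_dropWhile (p := fun w => res.contains w) (l := colas.getD t [])]
            rw [hR]
          refine ⟨dropped ++ (colas.getD t []).takeWhile (fun w => res.contains w) ++ [w], ?_, ?_⟩
          · rw [hdec, PySem.Dict.getD_insert_self]
            conv_lhs => rw [hsplit]
            simp
          · intro x hx
            simp only [List.append_assoc, List.mem_append, List.mem_singleton] at hx
            rcases hx with h | h | h
            · have hxr : x ∈ res := by simpa using hdm x h
              simp [hxr]
            · have := List.mem_takeWhile_imp h; simp at this ⊢; simp [this]
            · subst h; simp
        · obtain ⟨dr, h1, h2⟩ := hinv t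
          refine ⟨dr, by rw [PySem.Dict.getD_insert_of_ne _ _ _ ht]; exact h1, ?_⟩
          intro x hx
          have := h2 x hx
          simp at this ⊢
          simp [this]

-- ===== VERDICT (by name: the statement is the Claim_ definition above) =====
theorem aplicar_reglas_spec : Claim_equal_aplicar_reglas := by
  intro etiquetas palabras reglas _ hpre
  unfold Spec_aplicar_reglas
  simp only [aplicar_reglas, aplicar_reglas_alt]
  cases hget : (PySem.Dict.mk reglas).get? (PySem.Str.join " " etiquetas) with
  | none => rfl
  | some nuevo_orden =>
    have hlen : etiquetas.length ≤ palabras.length := by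
      apply hpre
      rw [PySem.Dict.contains_eq_isSome_get?, hget]
      rfl
    have hA : ∀ acc t, pvInnerA palabras t acc 0 etiquetas =
        pvFirst acc (pvWordsOf t (etiquetas.zip palabras)) := by
      intro acc t
      have := pvInnerA_eq palabras t etiquetas 0 acc (by omega)
      simpa using this
    rw [show (fun acc etiqueta => pvInnerA palabras etiqueta acc 0 etiquetas) =
        (fun acc t => pvFirst acc (pvWordsOf t (etiquetas.zip palabras))) from
      funext fun acc => funext fun t => hA acc t]
    apply pvConsume
    · intro w; rfl
    · intro t
      refine ⟨[], ?_, by simp⟩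
      rw [pvBuild_getD, pvFold_eq_dedupF]
      simp [PySem.Dict.getD]
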